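-- pv_equiv track=rewrite | github.com/salma-madoud/checkers-bot | CheckersBot (9) (1).py | EvaluateState
-- ===== SOURCE A (Python) =====
-- def EvaluateState(BoardState):
--     """Heuristic function for AI: counts pieces, giving more weight to Kings."""
--     ScoreValue = 0
--     for Row in BoardState:
--         for Piece in Row:
--             if Piece == 1: ScoreValue -= 1
--             elif Piece == 2: ScoreValue -= 3
--             elif Piece == 3: ScoreValue += 1
--             elif Piece == 4: ScoreValue += 3
--     return ScoreValue
-- ===== SOURCE B (Python) =====
-- def EvaluateState(BoardState):
--     """Heuristic function for AI: counts pieces, giving more weight to Kings."""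
--     cells = [Piece for Row in BoardState for Piece in Row]
--     return -cells.count(1) - 3 * cells.count(2) + cells.count(3) + 3 * cells.count(4)
-- ===== Notes on version B (the rewrite author's own statement) =====
-- stated objective: alternative
-- what changed: Replaced the per-cell if/elif branching accumulator with a count-then-combine scheme: flatten the board, take the four piece counts, and return the weighted combination -c1 - 3*c2 + c3 + 3*c4.
import Mathlib
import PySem

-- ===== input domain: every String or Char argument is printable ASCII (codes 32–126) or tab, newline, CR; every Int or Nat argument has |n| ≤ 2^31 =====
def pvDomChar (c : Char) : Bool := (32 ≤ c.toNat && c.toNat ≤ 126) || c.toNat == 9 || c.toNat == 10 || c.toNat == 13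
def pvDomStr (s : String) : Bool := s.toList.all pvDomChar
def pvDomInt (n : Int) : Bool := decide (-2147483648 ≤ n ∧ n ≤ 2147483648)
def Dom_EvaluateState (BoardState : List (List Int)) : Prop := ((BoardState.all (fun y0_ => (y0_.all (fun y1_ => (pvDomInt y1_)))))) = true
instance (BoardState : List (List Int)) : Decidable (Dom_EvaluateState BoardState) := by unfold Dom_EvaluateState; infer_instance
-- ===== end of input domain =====

-- B replaces A's per-cell if/elif accumulator by flatten + four counts combined arithmetically (alternative decomposition, same cost).

-- ===== PORT A =====
def EvaluateState (BoardState : List (List Int)) : Int :=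
  BoardState.foldl (fun ScoreValue Row =>
    Row.foldl (fun ScoreValue Piece =>
      if Piece == 1 then ScoreValue - 1
      else if Piece == 2 then ScoreValue - 3
      else if Piece == 3 then ScoreValue + 1
      else if Piece == 4 then ScoreValue + 3
      else ScoreValue) ScoreValue) 0

-- ===== PORT B =====
def EvaluateState_alt (BoardState : List (List Int)) : Int :=
  let cells := BoardState.flatMap (fun Row => Row);
  -(PySem.List.count cells 1 : Int) - 3 * (PySem.List.count cells 2 : Int)
    + (PySem.List.count cells 3 : Int) + 3 * (PySem.List.count cells 4 : Int)

-- ===== PRECONDITION & SPEC =====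
def Spec_EvaluateState (BoardState : List (List Int)) (out : Int) : Prop := out = EvaluateState_alt BoardState
instance (BoardState : List (List Int)) (out : Int) : Decidable (Spec_EvaluateState BoardState out) := by unfold Spec_EvaluateState; infer_instance

-- ===== CLAIM (what is proved, stated in full; the proofs are below) =====
def Claim_equal_EvaluateState : Prop := ∀ (BoardState : List (List Int)), Dom_EvaluateState BoardState → Spec_EvaluateState BoardState (EvaluateState BoardState)

-- ===== LEMMAS AND PROOFS =====

theorem pv_inner (l : List Int) (s : Int) :
    l.foldl (fun ScoreValue Piece =>
      if Piece == 1 then ScoreValue - 1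
      else if Piece == 2 then ScoreValue - 3
      else if Piece == 3 then ScoreValue + 1
      else if Piece == 4 then ScoreValue + 3
      else ScoreValue) s
    = s + (-(l.count 1 : Int) - 3 * (l.count 2 : Int) + (l.count 3 : Int) + 3 * (l.count 4 : Int)) := by
  induction l generalizing s with
  | nil => simp
  | cons a t ih =>
    simp only [List.foldl_cons, List.count_cons, ih]
    by_cases h1 : a = 1 <;> by_cases h2 : a = 2 <;> by_cases h3 : a = 3 <;> by_cases h4 : a = 4 <;>
      simp [h1, h2, h3, h4] <;> push_cast <;> omega

theorem pv_outer (B : List (List Int)) (s : Int) :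
    B.foldl (fun ScoreValue Row =>
      Row.foldl (fun ScoreValue Piece =>
        if Piece == 1 then ScoreValue - 1
        else if Piece == 2 then ScoreValue - 3
        else if Piece == 3 then ScoreValue + 1
        else if Piece == 4 then ScoreValue + 3
        else ScoreValue) ScoreValue) s
    = s + (-( (B.flatMap (fun Row => Row)).count 1 : Int)
        - 3 * ((B.flatMap (fun Row => Row)).count 2 : Int)
        + ((B.flatMap (fun Row => Row)).count 3 : Int)
        + 3 * ((B.flatMap (fun Row => Row)).count 4 : Int)) := by
  induction B generalizing s with
  | nil => simp
  | cons r t ih =>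
    simp only [List.foldl_cons]
    rw [pv_inner, ih, List.flatMap_cons]
    simp only [List.count_append]
    push_cast
    ring

-- ===== VERDICT (by name: the statement is the Claim_ definition above) =====
theorem EvaluateState_spec : Claim_equal_EvaluateState := by
  intro B _
  unfold Spec_EvaluateState EvaluateState EvaluateState_alt
  simp only [PySem.List.count_eq, pv_outer]
  ring
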